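-- pv_equiv track=rewrite | github.com/Genomika-Einstein/hepatites-virais | vcf_annotator.py | find
-- ===== SOURCE A (Python) =====
-- def find(pos, track):
-- # dada uma posição (1-based) no genoma em coordenadas absolutas,
-- # encontra a posição (0-based) em relação ao começo do gene
-- # (dado como uma lista de tuplas (ini, fim)).
-- 	pos = pos - 1 # 1- to 0-based
-- 	pos_rel = 0
-- 	for (ini, fim) in track:
-- 		if ini <= pos and pos < fim:
-- 			pos_rel += pos - ini
-- 			return pos_rel
-- 		else:
-- 			pos_rel += fim - ini
-- 	raise ValueError("position "+str(pos+1)+"not found in track "+track)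
-- ===== SOURCE B (Python) =====
-- def find(pos, track):
--     p = pos - 1
--     i = next((k for k, (ini, fim) in enumerate(track) if ini <= p < fim), None)
--     if i is None:
--         raise ValueError("position %d not found in track" % pos)
--     return sum(fim - ini for ini, fim in track[:i]) + (p - track[i][0])
-- ===== Notes on version B (the rewrite author's own statement) =====
-- stated objective: alternative
-- what changed: Instead of one loop accumulating the running offset, B first locates the index of the containing interval with no accumulation, then computes the answer as sum of widths of the preceding intervals plus the in-interval offset; on not-found it raises a clean ValueError where A's raise line itself crashes with a TypeError (str+list).
import Mathlib
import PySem

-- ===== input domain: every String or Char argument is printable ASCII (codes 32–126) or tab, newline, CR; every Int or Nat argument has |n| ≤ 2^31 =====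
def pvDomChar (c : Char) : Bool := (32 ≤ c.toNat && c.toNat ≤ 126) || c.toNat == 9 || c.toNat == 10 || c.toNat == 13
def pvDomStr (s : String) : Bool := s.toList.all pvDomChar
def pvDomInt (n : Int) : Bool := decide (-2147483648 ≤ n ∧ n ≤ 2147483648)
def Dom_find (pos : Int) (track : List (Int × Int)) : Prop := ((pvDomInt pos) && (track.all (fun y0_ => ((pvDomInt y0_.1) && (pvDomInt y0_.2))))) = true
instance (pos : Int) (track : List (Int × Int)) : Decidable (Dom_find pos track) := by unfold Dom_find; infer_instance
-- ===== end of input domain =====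

-- B replaces A's single accumulating loop by a find-index pass followed by a sum over the preceding intervals; on not-found both programs raise (A's raise line itself crashes with TypeError), excluded by Pre_find.


-- ===== PORT A =====
-- A's loop with the running accumulator pos_rel; the fall-through raise is outside Pre_find (value 0 here).
def findAux (p : Int) : List (Int × Int) → Int → Int
  | [], _ => 0
  | (ini, fim) :: t, acc =>
    if ini ≤ p ∧ p < fim then acc + (p - ini)
    else findAux p t (acc + (fim - ini))

def find (pos : Int) (track : List (Int × Int)) : Int :=
  findAux (pos - 1) track 0

-- ===== PORT B =====
-- first pass: index of the containing interval (B's next(... enumerate ...))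
def findIdx? (p : Int) : List (Int × Int) → Option Nat
  | [] => none
  | (ini, fim) :: t =>
    if ini ≤ p ∧ p < fim then some 0
    else (findIdx? p t).map (· + 1)

def find_alt (pos : Int) (track : List (Int × Int)) : Int :=
  let p := pos - 1
  match findIdx? p track with
  | none => 0   -- B raises ValueError here; outside Pre_find
  | some i => ((track.take i).map (fun q => q.2 - q.1)).sum + (p - (track.getD i (0, 0)).1)

-- ===== PRECONDITION & SPEC =====
-- Pre_find excludes exactly the inputs where A's fall-through raise fires (A itself crashes with a TypeError there, and B raises ValueError).
def Pre_find (pos : Int) (track : List (Int × Int)) : Prop :=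
  ∃ q ∈ track, q.1 ≤ pos - 1 ∧ pos - 1 < q.2
instance (pos : Int) (track : List (Int × Int)) : Decidable (Pre_find pos track) := by unfold Pre_find; infer_instance

def pvWitness_find : Int × (List (Int × Int)) := (5, [(0, 3), (3, 10)])

def Spec_find (pos : Int) (track : List (Int × Int)) (out : Int) : Prop := out = find_alt pos track
instance (pos : Int) (track : List (Int × Int)) (out : Int) : Decidable (Spec_find pos track out) := by unfold Spec_find; infer_instance

-- ===== CLAIM (what is proved, stated in full; the proofs are below) =====
def Claim_equal_find : Prop := ∀ (pos : Int) (track : List (Int × Int)), Dom_find pos track → Pre_find pos track → Spec_find pos track (find pos track)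

-- ===== LEMMAS AND PROOFS =====

theorem findIdx?_ne_none (p : Int) (t : List (Int × Int))
    (h : ∃ q ∈ t, q.1 ≤ p ∧ p < q.2) : findIdx? p t ≠ none := by
  induction t with
  | nil => simp at h
  | cons hd tl ih =>
    by_cases hc : hd.1 ≤ p ∧ p < hd.2
    · simp [findIdx?, hc]
    · rcases h with ⟨q, hq, hq2⟩
      rcases List.mem_cons.mp hq with h1 | h1
      · subst h1; exact absurd hq2 hc
      · simp only [findIdx?, if_neg hc]
        have := ih ⟨q, h1, hq2⟩
        rcases hx : findIdx? p tl <;> simp [hx] at this ⊢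

-- the common value, expressed via B's second pass, relative to an accumulator
theorem findAux_eq_alt (p : Int) (track : List (Int × Int))
    (h : ∃ q ∈ track, q.1 ≤ p ∧ p < q.2) (acc : Int) :
    findAux p track acc =
      acc + (match findIdx? p track with
             | none => 0
             | some i => ((track.take i).map (fun q => q.2 - q.1)).sum + (p - (track.getD i (0, 0)).1)) := by
  induction track generalizing acc with
  | nil => simp at h
  | cons hd t ih =>
    obtain ⟨ini, fim⟩ := hd
    by_cases hc : ini ≤ p ∧ p < fim
    · simp [findAux, findIdx?, hc]
    · have ht : ∃ q ∈ t, q.1 ≤ p ∧ p < q.2 := by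
        rcases h with ⟨q, hq, hq2⟩
        rcases List.mem_cons.mp hq with h1 | h1
        · subst h1; exact absurd hq2 hc
        · exact ⟨q, h1, hq2⟩
      rcases ho : findIdx? p t with _ | i
      · exact absurd ho (findIdx?_ne_none p t ht)
      · simp only [findAux, findIdx?, hc, ho, ih ht, Option.map_some]
        simp [List.take_succ_cons]
        ring

theorem find_spec_aux (pos : Int) (track : List (Int × Int)) (h : Pre_find pos track) :
    find pos track = find_alt pos track := by
  unfold find find_alt
  simpa using findAux_eq_alt (pos - 1) track h 0

-- ===== VERDICT (by name: the statement is the Claim_ definition above) =====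
theorem find_spec : Claim_equal_find := by
  intro pos track _ hpre
  exact find_spec_aux pos track hpre
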